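-- pv_equiv track=rewrite | github.com/yonishelach/MAPF | AcceleratedSearchProj/EnvironmentUtils.py | count_swapping_conflicts
-- ===== SOURCE A (Python) =====
-- def count_swapping_conflicts(plan):
--     count = 0
--     for i in range(len(plan)):
--         for j in range(len(plan)):
--             if i <= j:
--                 continue
--
--             for time in range(min(len(plan[i]), len(plan[j])) - 1):
--                 is_agent_at_source = plan[i][time] == plan[i][0]
--                 is_agent_at_destination = plan[i][time] == plan[i][-1]
--
--                 if is_agent_at_source or is_agent_at_destination:
--                     continue
--
--                 if plan[i][time + 1] == plan[j][time] and plan[i][time] == plan[j][time + 1]: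
--                     count += 1
--     return count
-- ===== SOURCE B (Python) =====
-- def _sweep(plan, t):
--     # one pass over the agents at timestep t: hash each agent's move (a, b); a valid
--     # agent (not at its source/destination) picks up the count of earlier (b, a) moves
--     moves = {}
--     found = 0
--     for p in plan:
--         if t + 1 < len(p):
--             a, b = p[t], p[t + 1]
--             if a != p[0] and a != p[-1]:
--                 found += moves.get((b, a), 0)
--             moves[(a, b)] = moves.get((a, b), 0) + 1
--     return found
--
--
-- def count_swapping_conflicts(plan):
--     horizon = 0
--     for p in plan:
--         horizon = max(horizon, len(p))
--     count = 0
--     for t in range(horizon - 1):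
--         count += _sweep(plan, t)
--     return count
-- ===== Notes on version B (the rewrite author's own statement) =====
-- stated objective: faster
-- what changed: Instead of scanning every ordered pair of agents and re-walking their common time range (O(n^2*T)), B walks each timestep once, hashing every agent's move (a,b) in a dict and adding, for each valid agent, the count of earlier agents that made the reverse move (b,a), giving O(n*T).
import Mathlib
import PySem

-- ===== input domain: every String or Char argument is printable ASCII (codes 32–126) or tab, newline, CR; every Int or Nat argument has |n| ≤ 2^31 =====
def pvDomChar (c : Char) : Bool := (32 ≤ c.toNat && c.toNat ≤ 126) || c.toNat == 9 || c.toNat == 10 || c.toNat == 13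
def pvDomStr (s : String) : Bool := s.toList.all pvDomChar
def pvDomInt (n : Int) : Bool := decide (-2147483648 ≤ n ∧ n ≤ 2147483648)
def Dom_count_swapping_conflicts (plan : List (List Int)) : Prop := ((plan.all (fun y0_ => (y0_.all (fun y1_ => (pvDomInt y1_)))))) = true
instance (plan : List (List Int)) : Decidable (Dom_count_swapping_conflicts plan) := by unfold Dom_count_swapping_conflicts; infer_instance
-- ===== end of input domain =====

-- B replaces A's all-pairs-of-agents scan by a per-timestep sweep that hashes each agent's
-- move and counts earlier agents making the reverse move (objective: faster).


-- ===== PORT A =====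
-- pyGetD is exact here: every index it is applied to is guarded by the loop bounds
-- (i, j < len(plan); time < min(len)-1), and plan[i][-1] is only read when the time
-- loop is nonempty, i.e. when the row is nonempty.
def count_swapping_conflicts (plan : List (List Int)) : Int :=
  (PySem.List.pyRange 0 (plan.length : Int) 1).foldl (fun count i =>
    (PySem.List.pyRange 0 (plan.length : Int) 1).foldl (fun count j =>
      if i ≤ j then count
      else
        let pi := PySem.List.pyGetD plan i []
        let pj := PySem.List.pyGetD plan j []
        (PySem.List.pyRange 0 (min (pi.length : Int) (pj.length : Int) - 1) 1).foldl
          (fun count time =>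
            let isAgentAtSource := PySem.List.pyGetD pi time 0 == PySem.List.pyGetD pi 0 0
            let isAgentAtDestination := PySem.List.pyGetD pi time 0 == PySem.List.pyGetD pi (-1) 0
            if isAgentAtSource || isAgentAtDestination then count
            else if PySem.List.pyGetD pi (time + 1) 0 == PySem.List.pyGetD pj time 0
                    && PySem.List.pyGetD pi time 0 == PySem.List.pyGetD pj (time + 1) 0
                 then count + 1 else count)
          count)
      count)
    0

-- ===== PORT B =====
-- B-side helper (Source B's _sweep): one pass over the agents at timestep t, hashing each
-- agent's move (a, b) and, for each valid agent, adding the count of earlier (b, a) moves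
def pvSweep (plan : List (List Int)) (t : Int) : Int :=
  (plan.foldl
    (fun (s : Int × PySem.Dict (Int × Int) Int) p =>
      if t + 1 < (p.length : Int) then
        let a := PySem.List.pyGetD p t 0
        let b := PySem.List.pyGetD p (t + 1) 0
        let found := if a ≠ PySem.List.pyGetD p 0 0 ∧ a ≠ PySem.List.pyGetD p (-1) 0
                     then s.1 + s.2.getD (b, a) 0 else s.1
        (found, s.2.insert (a, b) (s.2.getD (a, b) 0 + 1))
      else s)
    (0, PySem.Dict.empty)).1

def count_swapping_conflicts_alt (plan : List (List Int)) : Int :=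
  let horizon : Nat := plan.foldl (fun m p => max m p.length) 0
  (PySem.List.pyRange 0 ((horizon : Int) - 1) 1).foldl (fun count t => count + pvSweep plan t) 0

-- ===== PRECONDITION & SPEC =====
def Spec_count_swapping_conflicts (plan : List (List Int)) (out : Int) : Prop := out = count_swapping_conflicts_alt plan
instance (plan : List (List Int)) (out : Int) : Decidable (Spec_count_swapping_conflicts plan out) := by unfold Spec_count_swapping_conflicts; infer_instance

-- ===== CLAIM (what is proved, stated in full; the proofs are below) =====
def Claim_equal_count_swapping_conflicts : Prop := ∀ (plan : List (List Int)), Dom_count_swapping_conflicts plan → Spec_count_swapping_conflicts plan (count_swapping_conflicts plan)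

-- ===== LEMMAS AND PROOFS =====

-- row i of the plan (only read at indices < plan.length, so the default never shows)
def pvRow (plan : List (List Int)) (i : Nat) : List Int := plan.getD i []
-- agent p is strictly between its source and its destination at time t
def pvOk (p : List Int) (t : Nat) : Bool :=
  !(p.getD t 0 == p.getD 0 0 || p.getD t 0 == p.getD (p.length - 1) 0)
-- the move agent p makes from time t to time t+1
def pvMv (p : List Int) (t : Nat) : Int × Int := (p.getD t 0, p.getD (t + 1) 0)
-- agents pi and pj swap positions between t and t+1
def pvMatch (pi pj : List Int) (t : Nat) : Bool :=
  (pi.getD (t + 1) 0 == pj.getD t 0) && (pi.getD t 0 == pj.getD (t + 1) 0)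
-- the time-t moves of the agents of l still travelling at time t+1
def pvMoves (l : List (List Int)) (t : Nat) : List (Int × Int) :=
  (l.filter (fun p => decide (t + 1 < p.length))).map (fun p => pvMv p t)
-- contribution of agent i at time t: how many earlier agents make its reverse move
def pvTerm (plan : List (List Int)) (t i : Nat) : Int :=
  if decide (t + 1 < (pvRow plan i).length) && pvOk (pvRow plan i) t
  then ((pvMoves (plan.take i) t).count (pvMv (pvRow plan i) t).swap : Int) else 0
-- the Nat-level form of B's per-agent step
def pvStep (t : Nat) (s : Int × PySem.Dict (Int × Int) Int) (p : List Int) :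
    Int × PySem.Dict (Int × Int) Int :=
  if t + 1 < p.length then
    ((if pvOk p t then s.1 + s.2.getD (pvMv p t).swap 0 else s.1),
      s.2.insert (pvMv p t) (s.2.getD (pvMv p t) 0 + 1))
  else s

lemma pvGetD_neg_one (p : List Int) : PySem.List.pyGetD p (-1) 0 = p.getD (p.length - 1) 0 := by
  cases p with
  | nil => rfl
  | cons x xs => simp [PySem.List.pyGetD, PySem.List.pyGet?, PySem.List.pyIdx?]

lemma pvRange_sub_one (m : Nat) :
    PySem.List.pyRange 0 ((m : Int) - 1) 1 = (List.range (m - 1)).map (fun k : Nat => (k : Int)) := by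
  cases m with
  | zero => rfl
  | succ k =>
    have h : ((k + 1 : Nat) : Int) - 1 = (k : Int) := by push_cast; ring
    rw [h, PySem.List.pyRange_zero_natCast]
    norm_num

lemma pvSumRange (n : Nat) (f : Nat → Int) :
    ((List.range n).map f).sum = ∑ i ∈ Finset.range n, f i := rfl

lemma pvBoolStep (src dst m : Bool) (acc : Int) :
    (if src || dst then acc else if m then acc + 1 else acc)
      = acc + (if !(src || dst) && m then (1 : Int) else 0) := by
  cases src <;> cases dst <;> cases m <;> simp

-- ===== A-side characterisation =====

lemma pvA_inner (pi pj : List Int) (c : Int) :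
    (PySem.List.pyRange 0 (min (pi.length : Int) (pj.length : Int) - 1) 1).foldl
      (fun count time =>
        let isAgentAtSource := PySem.List.pyGetD pi time 0 == PySem.List.pyGetD pi 0 0
        let isAgentAtDestination := PySem.List.pyGetD pi time 0 == PySem.List.pyGetD pi (-1) 0
        if isAgentAtSource || isAgentAtDestination then count
        else if PySem.List.pyGetD pi (time + 1) 0 == PySem.List.pyGetD pj time 0
                && PySem.List.pyGetD pi time 0 == PySem.List.pyGetD pj (time + 1) 0
             then count + 1 else count) c
    = c + ∑ t ∈ Finset.range (min pi.length pj.length - 1),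
        (if pvOk pi t && pvMatch pi pj t then (1 : Int) else 0) := by
  have hm : (min (pi.length : Int) (pj.length : Int)) = ((min pi.length pj.length : Nat) : Int) := by
    simp
  rw [hm, pvRange_sub_one, List.foldl_map]
  rw [PySem.List.foldl_congr_mem _ _
    (fun count tn => count + (if pvOk pi tn && pvMatch pi pj tn then (1 : Int) else 0)) c ?_]
  · rw [PySem.List.foldl_add]
    rfl
  · intro acc tn _
    have h1 : ((tn : Int) + 1) = ((tn + 1 : Nat) : Int) := by push_cast; ring
    simp only [h1, PySem.List.pyGetD_natCast, PySem.List.pyGetD_ofNat', pvGetD_neg_one]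
    show _ = acc + (if pvOk pi tn && pvMatch pi pj tn then (1 : Int) else 0)
    rw [pvOk, pvMatch]
    exact pvBoolStep _ _ _ acc

lemma pvA_mid (plan : List (List Int)) (i : Nat) (c : Int) :
    ((List.range plan.length).map (fun k : Nat => (k : Int))).foldl (fun count j =>
      if (i : Int) ≤ j then count
      else
        let pi := PySem.List.pyGetD plan (i : Int) []
        let pj := PySem.List.pyGetD plan j []
        (PySem.List.pyRange 0 (min (pi.length : Int) (pj.length : Int) - 1) 1).foldl
          (fun count time =>
            let isAgentAtSource := PySem.List.pyGetD pi time 0 == PySem.List.pyGetD pi 0 0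
            let isAgentAtDestination := PySem.List.pyGetD pi time 0 == PySem.List.pyGetD pi (-1) 0
            if isAgentAtSource || isAgentAtDestination then count
            else if PySem.List.pyGetD pi (time + 1) 0 == PySem.List.pyGetD pj time 0
                    && PySem.List.pyGetD pi time 0 == PySem.List.pyGetD pj (time + 1) 0
                 then count + 1 else count)
          count)
      c
    = c + ∑ j ∈ Finset.range plan.length,
        if j < i then
          (∑ t ∈ Finset.range (min (pvRow plan i).length (pvRow plan j).length - 1),
            if pvOk (pvRow plan i) t && pvMatch (pvRow plan i) (pvRow plan j) t
            then (1 : Int) else 0)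
        else 0 := by
  rw [List.foldl_map]
  rw [PySem.List.foldl_congr_mem _ _
    (fun count jn => count +
      (if jn < i then
        (∑ t ∈ Finset.range (min (pvRow plan i).length (pvRow plan jn).length - 1),
          if pvOk (pvRow plan i) t && pvMatch (pvRow plan i) (pvRow plan jn) t
          then (1 : Int) else 0)
       else 0)) c ?_]
  · rw [PySem.List.foldl_add, pvSumRange]
  · intro acc jn _
    by_cases h : i ≤ jn
    · have h1 : ((i : Int) ≤ (jn : Int)) := by exact_mod_cast h
      have h2 : ¬ (jn < i) := by omega
      simp only [if_pos h1, if_neg h2, add_zero]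
    · have h1 : ¬ ((i : Int) ≤ (jn : Int)) := by exact_mod_cast h
      have h2 : jn < i := by omega
      simp only [if_neg h1, if_pos h2]
      simp only [PySem.List.pyGetD_natCast]
      exact pvA_inner (plan.getD i []) (plan.getD jn []) acc

lemma pvA_eq (plan : List (List Int)) :
    count_swapping_conflicts plan
      = ∑ i ∈ Finset.range plan.length, ∑ j ∈ Finset.range plan.length,
          if j < i then
            (∑ t ∈ Finset.range (min (pvRow plan i).length (pvRow plan j).length - 1),
              if pvOk (pvRow plan i) t && pvMatch (pvRow plan i) (pvRow plan j) t
              then (1 : Int) else 0)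
          else 0 := by
  rw [count_swapping_conflicts]
  rw [PySem.List.pyRange_zero_natCast, List.foldl_map]
  rw [PySem.List.foldl_congr_mem _ _
    (fun count inn => count +
      ∑ j ∈ Finset.range plan.length,
        if j < inn then
          (∑ t ∈ Finset.range (min (pvRow plan inn).length (pvRow plan j).length - 1),
            if pvOk (pvRow plan inn) t && pvMatch (pvRow plan inn) (pvRow plan j) t
            then (1 : Int) else 0)
        else 0) 0 ?_]
  · rw [PySem.List.foldl_add, pvSumRange, zero_add]
  · intro acc inn _
    exact pvA_mid plan inn acc

-- ===== B-side characterisation =====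

lemma pvStep_cast (tn : Nat) (s : Int × PySem.Dict (Int × Int) Int) (p : List Int) :
    (if (tn : Int) + 1 < (p.length : Int) then
        let a := PySem.List.pyGetD p (tn : Int) 0
        let b := PySem.List.pyGetD p ((tn : Int) + 1) 0
        let found := if a ≠ PySem.List.pyGetD p 0 0 ∧ a ≠ PySem.List.pyGetD p (-1) 0
                     then s.1 + s.2.getD (b, a) 0 else s.1
        (found, s.2.insert (a, b) (s.2.getD (a, b) 0 + 1))
      else s) = pvStep tn s p := by
  rw [pvStep]
  by_cases h : tn + 1 < p.length
  · have h1 : ((tn : Int) + 1 < (p.length : Int)) := by exact_mod_cast h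
    rw [if_pos h1, if_pos h]
    have h2 : ((tn : Int) + 1) = ((tn + 1 : Nat) : Int) := by push_cast; ring
    simp only [h2, PySem.List.pyGetD_natCast, PySem.List.pyGetD_ofNat', pvGetD_neg_one]
    have h3 : (¬ p.getD tn 0 = p.getD 0 0 ∧ ¬ p.getD tn 0 = p.getD (p.length - 1) 0)
        ↔ (pvOk p tn = true) := by
      rw [pvOk]; simp
    rw [pvMv]
    by_cases h4 : pvOk p tn = true
    · rw [if_pos (h3.mpr h4), if_pos h4, Prod.swap_prod_mk]
    · rw [if_neg (fun hc => h4 (h3.mp hc)), if_neg h4]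
  · have h1 : ¬ ((tn : Int) + 1 < (p.length : Int)) := by exact_mod_cast h
    rw [if_neg h1, if_neg h]

lemma pvSweep_inv (tn : Nat) (l : List (List Int)) (c0 : Int) (ms : List (Int × Int)) :
    (l.foldl (pvStep tn) (c0, PySem.Dict.counter ms)).1
      = c0 + ∑ i ∈ Finset.range l.length,
          (if decide (tn + 1 < (l.getD i []).length) && pvOk (l.getD i []) tn
           then (((ms ++ pvMoves (l.take i) tn).count (pvMv (l.getD i []) tn).swap : Nat) : Int)
           else 0) := by
  induction l generalizing c0 ms with
  | nil => simp
  | cons p l ih =>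
    rw [List.foldl_cons]
    by_cases h : tn + 1 < p.length
    · have hstep : pvStep tn (c0, PySem.Dict.counter ms) p
          = ((if pvOk p tn then c0 + ((ms.count (pvMv p tn).swap : Nat) : Int) else c0),
             PySem.Dict.counter (ms ++ [pvMv p tn])) := by
        rw [pvStep, if_pos h, PySem.Dict.counter_append_singleton, PySem.Dict.modify]
        simp [PySem.Dict.getD_counter]
      rw [hstep, ih]
      rw [List.length_cons, Finset.sum_range_succ']
      have htake : ∀ i : Nat, ms ++ pvMoves ((p :: l).take (i + 1)) tn
          = (ms ++ [pvMv p tn]) ++ pvMoves (l.take i) tn := by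
        intro i
        simp [pvMoves, h, List.append_assoc]
      have hterm0 : (if decide (tn + 1 < ((p :: l).getD 0 []).length) && pvOk ((p :: l).getD 0 []) tn
           then (((ms ++ pvMoves ((p :: l).take 0) tn).count (pvMv ((p :: l).getD 0 []) tn).swap : Nat) : Int)
           else 0) = (if pvOk p tn then ((ms.count (pvMv p tn).swap : Nat) : Int) else 0) := by
        simp [h, pvMoves]
      rw [hterm0]
      have hsum : ∀ i ∈ Finset.range l.length,
          (if decide (tn + 1 < ((p :: l).getD (i + 1) []).length) && pvOk ((p :: l).getD (i + 1) []) tn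
           then (((ms ++ pvMoves ((p :: l).take (i + 1)) tn).count (pvMv ((p :: l).getD (i + 1) []) tn).swap : Nat) : Int)
           else 0)
          = (if decide (tn + 1 < (l.getD i []).length) && pvOk (l.getD i []) tn
           then ((((ms ++ [pvMv p tn]) ++ pvMoves (l.take i) tn).count (pvMv (l.getD i []) tn).swap : Nat) : Int)
           else 0) := by
        intro i _
        rw [htake i]
        rfl
      rw [Finset.sum_congr rfl hsum]
      by_cases h4 : pvOk p tn = true
      · rw [if_pos h4, if_pos h4]; ring
      · rw [if_neg h4, if_neg h4]; ring
    · have hstep : pvStep tn (c0, PySem.Dict.counter ms) p = (c0, PySem.Dict.counter ms) := by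
        rw [pvStep, if_neg h]
      rw [hstep, ih]
      rw [List.length_cons, Finset.sum_range_succ']
      have hterm0 : (if decide (tn + 1 < ((p :: l).getD 0 []).length) && pvOk ((p :: l).getD 0 []) tn
           then (((ms ++ pvMoves ((p :: l).take 0) tn).count (pvMv ((p :: l).getD 0 []) tn).swap : Nat) : Int)
           else 0) = 0 := by
        simp [h]
      rw [hterm0, add_zero]
      have htake : ∀ i : Nat, pvMoves ((p :: l).take (i + 1)) tn = pvMoves (l.take i) tn := by
        intro i
        simp [pvMoves, h]
      congr 1
      refine Finset.sum_congr rfl ?_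
      intro i _
      rw [htake i]
      rfl

lemma pvSweep_eq (plan : List (List Int)) (tn : Nat) :
    pvSweep plan (tn : Int) = ∑ i ∈ Finset.range plan.length, pvTerm plan tn i := by
  rw [pvSweep]
  have hc : (PySem.Dict.empty : PySem.Dict (Int × Int) Int) = PySem.Dict.counter [] := rfl
  rw [hc, PySem.List.foldl_congr_mem _ _ (pvStep tn) _ (fun acc p _ => pvStep_cast tn acc p)]
  rw [pvSweep_inv, zero_add]
  refine Finset.sum_congr rfl ?_
  intro i _
  rw [pvTerm, pvRow, List.nil_append]

lemma pvB_eq (plan : List (List Int)) :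
    count_swapping_conflicts_alt plan
      = ∑ t ∈ Finset.range (plan.foldl (fun m p => max m p.length) 0 - 1),
          ∑ i ∈ Finset.range plan.length, pvTerm plan t i := by
  rw [count_swapping_conflicts_alt]
  rw [pvRange_sub_one, List.foldl_map, PySem.List.foldl_add, pvSumRange, zero_add]
  exact Finset.sum_congr rfl (fun t _ => pvSweep_eq plan t)

-- ===== counting lemmas =====

lemma pvCount_moves (l : List (List Int)) (tn : Nat) (v : Int × Int) :
    (pvMoves l tn).count v
      = l.countP (fun p => decide (tn + 1 < p.length) && (pvMv p tn == v)) := by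
  rw [pvMoves, List.count_eq_countP, List.countP_map, List.countP_filter]
  refine List.countP_congr ?_
  intro p _
  simp [Bool.and_comm]

lemma pvCountP_sum (l : List (List Int)) (q : List Int → Bool) (i : Nat) (h : i ≤ l.length) :
    (∑ j ∈ Finset.range i, if q (l.getD j []) then (1 : Int) else 0)
      = ((l.take i).countP q : Int) := by
  induction i with
  | zero => simp
  | succ k ih =>
    have hk : k < l.length := by omega
    rw [Finset.sum_range_succ, ih (by omega), List.take_add_one,
        List.getElem?_eq_getElem hk]
    have hg : l.getD k [] = l[k] := by
      rw [List.getD_eq_getElem?_getD, List.getElem?_eq_getElem hk]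
      rfl
    rw [hg, List.countP_append]
    have h1 : List.countP q (some l[k]).toList = if q l[k] = true then 1 else 0 := by
      simp [List.countP_cons]
    rw [h1]
    by_cases hq : q l[k] = true
    · rw [if_pos hq, if_pos hq]; push_cast; ring
    · rw [if_neg hq, if_neg hq]; push_cast; ring

lemma pvMatch_eq_beq (pi p : List Int) (t : Nat) :
    pvMatch pi p t = (pvMv p t == (pvMv pi t).swap) := by
  rw [pvMatch, pvMv, pvMv, Prod.swap_prod_mk]
  have h : ((p.getD t 0, p.getD (t + 1) 0) == (pi.getD (t + 1) 0, pi.getD t 0))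
      = ((p.getD t 0 == pi.getD (t + 1) 0) && (p.getD (t + 1) 0 == pi.getD t 0)) := rfl
  rw [h, Bool.eq_iff_iff]
  simp only [Bool.and_eq_true, beq_iff_eq]
  constructor
  · rintro ⟨a, b⟩; exact ⟨a.symm, b.symm⟩
  · rintro ⟨a, b⟩; exact ⟨a.symm, b.symm⟩

-- ===== the combinatorial exchange =====

lemma pvAB (plan : List (List Int)) :
    (∑ i ∈ Finset.range plan.length, ∑ j ∈ Finset.range plan.length,
      if j < i then
        (∑ t ∈ Finset.range (min (pvRow plan i).length (pvRow plan j).length - 1),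
          if pvOk (pvRow plan i) t && pvMatch (pvRow plan i) (pvRow plan j) t
          then (1 : Int) else 0)
      else 0)
    = ∑ t ∈ Finset.range (plan.foldl (fun m p => max m p.length) 0 - 1),
        ∑ i ∈ Finset.range plan.length, pvTerm plan t i := by
  set H := plan.foldl (fun m p => max m p.length) 0 with hH
  have hrow : ∀ i, i < plan.length → (pvRow plan i).length ≤ H := by
    intro i hi
    have hmem : pvRow plan i ∈ plan := by
      rw [pvRow, List.getD_eq_getElem?_getD, List.getElem?_eq_getElem hi]
      exact List.getElem_mem hi
    exact (PySem.List.le_foldl_max_nat plan (fun p => p.length) 0).2 _ hmem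
  conv_rhs => rw [Finset.sum_comm]
  refine Finset.sum_congr rfl ?_
  intro i hi
  have hin : i < plan.length := Finset.mem_range.mp hi
  -- restrict the j-sum to j < i
  have h1 : (∑ j ∈ Finset.range plan.length,
        if j < i then
          (∑ t ∈ Finset.range (min (pvRow plan i).length (pvRow plan j).length - 1),
            if pvOk (pvRow plan i) t && pvMatch (pvRow plan i) (pvRow plan j) t
            then (1 : Int) else 0)
        else 0)
      = ∑ j ∈ Finset.range i,
          (∑ t ∈ Finset.range (min (pvRow plan i).length (pvRow plan j).length - 1),
            if pvOk (pvRow plan i) t && pvMatch (pvRow plan i) (pvRow plan j) t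
            then (1 : Int) else 0) := by
    have e : ∀ j ∈ Finset.range plan.length,
        (if j < i then
          (∑ t ∈ Finset.range (min (pvRow plan i).length (pvRow plan j).length - 1),
            if pvOk (pvRow plan i) t && pvMatch (pvRow plan i) (pvRow plan j) t
            then (1 : Int) else 0)
        else 0)
        = (if j ∈ Finset.range i then
          (∑ t ∈ Finset.range (min (pvRow plan i).length (pvRow plan j).length - 1),
            if pvOk (pvRow plan i) t && pvMatch (pvRow plan i) (pvRow plan j) t
            then (1 : Int) else 0)
        else 0) := by
      intro j _
      by_cases hj : j < i
      · rw [if_pos hj, if_pos (Finset.mem_range.mpr hj)]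
      · rw [if_neg hj, if_neg (fun hc => hj (Finset.mem_range.mp hc))]
    rw [Finset.sum_congr rfl e, Finset.sum_ite_mem, Finset.range_inter_range,
        min_eq_right (le_of_lt hin)]
  rw [h1]
  -- widen every t-sum to range (H - 1), with explicit length guards
  have h2 : ∀ j, j < i →
      (∑ t ∈ Finset.range (min (pvRow plan i).length (pvRow plan j).length - 1),
        if pvOk (pvRow plan i) t && pvMatch (pvRow plan i) (pvRow plan j) t
        then (1 : Int) else 0)
      = ∑ t ∈ Finset.range (H - 1),
          (if (decide (t + 1 < (pvRow plan i).length) && pvOk (pvRow plan i) t)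
              && (decide (t + 1 < (pvRow plan j).length) && pvMatch (pvRow plan i) (pvRow plan j) t)
           then (1 : Int) else 0) := by
    intro j hj
    have hjn : j < plan.length := lt_trans hj hin
    have hsub : Finset.range (min (pvRow plan i).length (pvRow plan j).length - 1)
        ⊆ Finset.range (H - 1) := by
      intro x hx
      have hx' := Finset.mem_range.mp hx
      have h3 := hrow i hin
      have hml := Nat.min_le_left (pvRow plan i).length (pvRow plan j).length
      exact Finset.mem_range.mpr (by omega)
    rw [← Finset.sum_subset hsub ?_]
    · refine Finset.sum_congr rfl ?_
      intro t ht
      have htm := Finset.mem_range.mp ht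
      have hml := Nat.min_le_left (pvRow plan i).length (pvRow plan j).length
      have hmr := Nat.min_le_right (pvRow plan i).length (pvRow plan j).length
      have hti : t + 1 < (pvRow plan i).length := by omega
      have htj : t + 1 < (pvRow plan j).length := by omega
      simp [hti, htj]
    · intro t _ htn
      have htm : ¬ (t < min (pvRow plan i).length (pvRow plan j).length - 1) :=
        fun hc => htn (Finset.mem_range.mpr hc)
      have : ¬ (t + 1 < (pvRow plan i).length) ∨ ¬ (t + 1 < (pvRow plan j).length) := by
        rcases Nat.le_total (pvRow plan i).length (pvRow plan j).length with hab | hab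
        · rw [min_eq_left hab] at htm; left; omega
        · rw [min_eq_right hab] at htm; right; omega
      rcases this with h5 | h5 <;> simp [h5]
  rw [Finset.sum_congr rfl (fun j hj => h2 j (Finset.mem_range.mp hj)), Finset.sum_comm]
  -- collapse the j-sum into the hashed count of reverse moves among earlier agents
  refine Finset.sum_congr rfl ?_
  intro t _
  by_cases hA : (decide (t + 1 < (pvRow plan i).length) && pvOk (pvRow plan i) t) = true
  · have e : ∀ j ∈ Finset.range i,
        (if (decide (t + 1 < (pvRow plan i).length) && pvOk (pvRow plan i) t)
            && (decide (t + 1 < (pvRow plan j).length) && pvMatch (pvRow plan i) (pvRow plan j) t)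
         then (1 : Int) else 0)
        = (if (fun p => decide (t + 1 < p.length) && pvMatch (pvRow plan i) p t) (plan.getD j [])
           then (1 : Int) else 0) := by
      intro j _
      rw [hA, Bool.true_and]
      rfl
    rw [Finset.sum_congr rfl e,
        pvCountP_sum plan (fun p => decide (t + 1 < p.length) && pvMatch (pvRow plan i) p t)
          i (le_of_lt hin)]
    rw [pvTerm, if_pos hA, pvCount_moves]
    congr 1
    refine List.countP_congr ?_
    intro p _
    rw [pvMatch_eq_beq (pvRow plan i) p t]
  · have e : ∀ j ∈ Finset.range i,
        (if (decide (t + 1 < (pvRow plan i).length) && pvOk (pvRow plan i) t)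
            && (decide (t + 1 < (pvRow plan j).length) && pvMatch (pvRow plan i) (pvRow plan j) t)
         then (1 : Int) else 0) = 0 := by
      intro j _
      simp [Bool.and_eq_true] at hA
      by_cases hd : (t + 1 < (pvRow plan i).length)
      · simp [hd] at hA ⊢
        simp [hA]
      · simp [hd]
    rw [Finset.sum_congr rfl e, pvTerm, if_neg hA, Finset.sum_const, smul_zero]

-- ===== VERDICT (by name: the statement is the Claim_ definition above) =====
theorem count_swapping_conflicts_spec : Claim_equal_count_swapping_conflicts := by
  intro plan _
  unfold Spec_count_swapping_conflicts
  rw [pvA_eq, pvB_eq, pvAB]
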